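-- pv_equiv track=rewrite | github.com/mdowell12/advent-of-code-2021 | solutions/5/run.py | _generate_segment
-- ===== SOURCE A (Python) =====
-- def _generate_segment(first, second, count_diags=False):
--     is_diag = first[0] != second[0] and first[1] != second[1]
--     if not count_diags and is_diag:
--         return []
--
--     segment = []
--     start_x = min(first[0], second[0])
--     end_x = max(first[0], second[0])
--     start_y = min(first[1], second[1])
--     end_y = max(first[1], second[1])
--
--     if not is_diag:
--         for x in range(start_x, end_x + 1):
--             for y in range(start_y, end_y + 1):
--                 segment.append((x, y))
--     else:
--         start_point = first if start_x == first[0] else second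
--         direction = -1 if start_point[1] == end_y else 1
--         for i in range(end_x - start_x + 1):
--             x = start_x + i
--             y = start_point[1] + i * direction
--             segment.append((x, y))
--     return segment
-- ===== SOURCE B (Python) =====
-- def _generate_segment(first, second, count_diags=False):
--     is_diag = first[0] != second[0] and first[1] != second[1]
--     if not count_diags and is_diag:
--         return []
--     start, other = (first, second) if first <= second else (second, first)
--     dx = (other[0] > start[0]) - (other[0] < start[0])
--     dy = (other[1] > start[1]) - (other[1] < start[1])
--     n = other[0] - start[0] if dx else other[1] - start[1]
--     return [(start[0] + i * dx, start[1] + i * dy) for i in range(n + 1)]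
-- ===== Notes on version B (the rewrite author's own statement) =====
-- stated objective: simpler
-- what changed: replaces A's two separate emission loops (nested x/y loops for axis-aligned lines, a dedicated diagonal loop with start-point/direction reconstruction) by one unified single loop stepping by coordinate signs from the lexicographically smaller endpoint
import Mathlib
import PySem

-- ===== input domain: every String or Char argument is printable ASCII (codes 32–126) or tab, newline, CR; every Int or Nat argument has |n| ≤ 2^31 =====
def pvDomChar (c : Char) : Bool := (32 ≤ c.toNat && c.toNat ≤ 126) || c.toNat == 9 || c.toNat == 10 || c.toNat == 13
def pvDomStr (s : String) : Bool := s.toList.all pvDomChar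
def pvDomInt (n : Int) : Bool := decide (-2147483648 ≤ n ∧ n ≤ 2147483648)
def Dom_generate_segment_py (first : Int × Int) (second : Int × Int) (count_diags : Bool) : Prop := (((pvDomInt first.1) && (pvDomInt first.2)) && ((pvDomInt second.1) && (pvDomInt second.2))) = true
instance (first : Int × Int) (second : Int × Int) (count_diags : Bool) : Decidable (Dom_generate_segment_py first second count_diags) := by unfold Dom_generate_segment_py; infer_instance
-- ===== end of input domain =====

-- B replaces A's two separate emission loops by one unified sign-step loop from the
-- lexicographically smaller endpoint; objective: simpler (same asymptotic cost).

-- ===== PORT A =====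
def generate_segment_py (first : Int × Int) (second : Int × Int) (count_diags : Bool) : List (Int × Int) :=
  let is_diag : Bool := first.1 != second.1 && first.2 != second.2
  if !count_diags && is_diag then []
  else
    let start_x := min first.1 second.1
    let end_x := max first.1 second.1
    let start_y := min first.2 second.2
    let end_y := max first.2 second.2
    if !is_diag then
      (PySem.List.pyRange start_x (end_x + 1) 1).foldl (fun seg x =>
        (PySem.List.pyRange start_y (end_y + 1) 1).foldl (fun seg y => seg ++ [(x, y)]) seg) []
    else
      let start_point := if start_x == first.1 then first else second
      let direction : Int := if start_point.2 == end_y then -1 else 1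
      (PySem.List.pyRange 0 (end_x - start_x + 1) 1).foldl (fun seg i =>
        seg ++ [(start_x + i, start_point.2 + i * direction)]) []

-- ===== PORT B =====
def generate_segment_py_alt (first : Int × Int) (second : Int × Int) (count_diags : Bool) : List (Int × Int) :=
  let is_diag : Bool := first.1 != second.1 && first.2 != second.2
  if !count_diags && is_diag then []
  else
    -- 'first <= second' on Python tuples is lexicographic
    let lex_le : Bool := decide (first.1 < second.1 ∨ (first.1 = second.1 ∧ first.2 ≤ second.2))
    let start := if lex_le then first else second
    let other := if lex_le then second else first
    let dx : Int := (if other.1 > start.1 then 1 else 0) - (if other.1 < start.1 then 1 else 0)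
    let dy : Int := (if other.2 > start.2 then 1 else 0) - (if other.2 < start.2 then 1 else 0)
    let n : Int := if dx != 0 then other.1 - start.1 else other.2 - start.2
    (PySem.List.pyRange 0 (n + 1) 1).map (fun i => (start.1 + i * dx, start.2 + i * dy))

-- ===== PRECONDITION & SPEC =====
def Spec_generate_segment_py (first : Int × Int) (second : Int × Int) (count_diags : Bool) (out : List (Int × Int)) : Prop := out = generate_segment_py_alt first second count_diags
instance (first : Int × Int) (second : Int × Int) (count_diags : Bool) (out : List (Int × Int)) : Decidable (Spec_generate_segment_py first second count_diags out) := by unfold Spec_generate_segment_py; infer_instance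

-- ===== CLAIM (what is proved, stated in full; the proofs are below) =====
def Claim_equal_generate_segment_py : Prop := ∀ (first : Int × Int) (second : Int × Int) (count_diags : Bool), Dom_generate_segment_py first second count_diags → Spec_generate_segment_py first second count_diags (generate_segment_py first second count_diags)

-- ===== LEMMAS AND PROOFS =====

theorem map_pyRange_shift {β : Type} (f : Int → β) (a b : Int) :
    List.map f (PySem.List.pyRange a b 1) = List.map (fun i => f (a + i)) (PySem.List.pyRange 0 (b - a) 1) := by
  simp [PySem.List.pyRange_one]

theorem flatten_map_sing {α β : Type} (l : List α) (f : α → β) :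
    (List.map (fun x => [f x]) l).flatten = List.map f l := by
  induction l with
  | nil => rfl
  | cons a t ih => simp [ih]

theorem generate_segment_eq (first second : Int × Int) (count_diags : Bool) :
    generate_segment_py first second count_diags = generate_segment_py_alt first second count_diags := by
  obtain ⟨a1, a2⟩ := first
  obtain ⟨b1, b2⟩ := second
  simp only [generate_segment_py, generate_segment_py_alt]
  rcases lt_trichotomy a1 b1 with h1 | h1 | h1
  · rcases lt_trichotomy a2 b2 with h2 | h2 | h2
    · cases count_diags
      · simp [h1.ne, h2.ne]
      · simp [h1.ne, h2.ne, h1, h2, min_eq_left h1.le, max_eq_right h1.le,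
          max_eq_right h2.le, h1.not_gt, h2.asymm, flatten_map_sing]
    · subst h2
      simp [h1.ne, h1, min_eq_left h1.le, max_eq_right h1.le, h1.not_gt,
        PySem.List.pyRange_one_singleton, flatten_map_sing]
      rw [map_pyRange_shift, show b1 + 1 - a1 = b1 - a1 + 1 from by ring]
    · cases count_diags
      · simp [h1.ne, h2.ne']
      · simp [h1.ne, h2.ne', h1, h2, min_eq_left h1.le, max_eq_right h1.le,
          max_eq_left h2.le, h1.not_gt, h2.asymm, flatten_map_sing]
  · subst h1
    rcases lt_trichotomy a2 b2 with h2 | h2 | h2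
    · simp [h2, h2.le, h2.asymm,
        PySem.List.pyRange_one_singleton, flatten_map_sing]
      rw [map_pyRange_shift, show b2 + 1 - a2 = b2 - a2 + 1 from by ring]
    · subst h2
      simp [PySem.List.pyRange_one_singleton]
    · simp [h2, h2.asymm, not_le.mpr h2, min_eq_right h2.le, max_eq_left h2.le,
        PySem.List.pyRange_one_singleton, flatten_map_sing]
      rw [map_pyRange_shift, show a2 + 1 - b2 = a2 - b2 + 1 from by ring]
  · rcases lt_trichotomy a2 b2 with h2 | h2 | h2
    · cases count_diags
      · simp [h1.ne', h2.ne]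
      · simp [h1.ne, h1.ne', h2.ne, h1, h2, not_lt.mpr h1.le, min_eq_right h1.le, max_eq_left h1.le,
          max_eq_right h2.le, h2.asymm, flatten_map_sing]
    · subst h2
      simp [h1.ne', h1, h1.asymm, min_eq_right h1.le, max_eq_left h1.le,
        PySem.List.pyRange_one_singleton, flatten_map_sing]
      rw [map_pyRange_shift, show a1 + 1 - b1 = a1 - b1 + 1 from by ring]
    · cases count_diags
      · simp [h1.ne', h2.ne']
      · simp [h1.ne, h1.ne', h2.ne, h2.ne', h1, h2, not_lt.mpr h1.le, min_eq_right h1.le, max_eq_left h1.le,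
          max_eq_left h2.le, h2.asymm,
          flatten_map_sing]

-- ===== VERDICT (by name: the statement is the Claim_ definition above) =====
theorem generate_segment_py_spec : Claim_equal_generate_segment_py := by
  intro first second count_diags _
  exact (generate_segment_eq first second count_diags).symm ▸ rfl
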